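-- pv_equiv track=rewrite | github.com/FangXzhong/cs2021 | homework/Assignment #C/月度开销.py | check
-- ===== SOURCE A (Python) =====
-- def check(up, num_list, max_period):
--     temp = 0
--     total = 0
--     for i in range(len(num_list)):
--         if i == len(num_list) - 1:
--             if temp == 0:
--                 total += 1
--             else:
--                 total += 1
--         else:
--             temp += num_list[i]
--             if temp + num_list[i + 1] > up:
--                 temp = 0
--                 total += 1
--     return True if total <= max_period else False
-- ===== SOURCE B (Python) =====
-- def check(up, num_list, max_period):
--     # Collapse an explicit stack instead of scanning with a running-sum accumulator:
--     # the stack holds the remaining values (top = next value); the top two are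
--     # repeatedly merged if they fit under the cap, otherwise the top is retired
--     # as one finished group.
--     stack = list(num_list)[::-1]
--     total = 0
--     while len(stack) >= 2:
--         x = stack.pop()
--         y = stack.pop()
--         if x + y > up:
--             total += 1
--             stack.append(y)
--         else:
--             stack.append(x + y)
--     return total + len(stack) <= max_period
-- ===== Notes on version B (the rewrite author's own statement) =====
-- stated objective: alternative
-- what changed: Replaces A's index loop with running-sum/counter state and look-ahead to num_list[i+1] by a stack-collapsing rewrite: the values are pushed on a stack and the top two are repeatedly merged if they fit under the cap or the top retired as a finished group, with no temp accumulator and no last-element special case.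
import Mathlib
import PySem

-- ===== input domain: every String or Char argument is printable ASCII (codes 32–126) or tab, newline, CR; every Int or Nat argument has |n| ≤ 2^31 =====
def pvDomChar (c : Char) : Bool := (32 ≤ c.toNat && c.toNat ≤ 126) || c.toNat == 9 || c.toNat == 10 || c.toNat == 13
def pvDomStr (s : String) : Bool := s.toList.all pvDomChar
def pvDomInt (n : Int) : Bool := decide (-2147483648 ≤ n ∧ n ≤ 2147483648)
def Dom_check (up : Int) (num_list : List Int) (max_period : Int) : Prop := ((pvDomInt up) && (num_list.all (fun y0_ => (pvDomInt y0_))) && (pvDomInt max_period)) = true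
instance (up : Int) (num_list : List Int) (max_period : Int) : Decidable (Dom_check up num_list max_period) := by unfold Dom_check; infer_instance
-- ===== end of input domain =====

-- B replaces A's index loop (running-sum/counter state, look-ahead to num_list[i+1],
-- redundant last-iteration if/else) by a stack-collapsing rewrite: merge the top two
-- values if they fit under the cap, otherwise retire the top as a finished group.

-- ===== PORT A =====
-- loop body of A: state (temp, total), loop variable i over range(len(num_list))
def checkBody (up : Int) (num_list : List Int) (s : Int × Int) (i : Int) : Int × Int :=
  if i = (num_list.length : Int) - 1 then
    if s.1 = 0 then (s.1, s.2 + 1) else (s.1, s.2 + 1)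
  else
    let temp := s.1 + PySem.List.pyGetD num_list i 0
    if temp + PySem.List.pyGetD num_list (i + 1) 0 > up then (0, s.2 + 1)
    else (temp, s.2)

def check (up : Int) (num_list : List Int) (max_period : Int) : Bool :=
  let st := (PySem.List.pyRange 0 (num_list.length : Int) 1).foldl (checkBody up num_list) (0, 0)
  if st.2 ≤ max_period then true else false

-- ===== PORT B =====
-- Source B keeps the stack reversed (top = last element, pop/append at the end); the port
-- represents the same stack with its top at the HEAD, so Python's pop()/append() at the
-- end become head operations here and `list(num_list)[::-1]` is the list itself.
-- The while loop (len(stack) >= 2) is the structural recursion below; the fall-through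
-- case returns total + len(stack) as in Source B's final line.
def checkAltGo (up : Int) : List Int → Int → Int
  | x :: y :: r, total =>
      if x + y > up then checkAltGo up (y :: r) (total + 1)
      else checkAltGo up ((x + y) :: r) total
  | xs, total => total + xs.length
termination_by xs _ => xs.length

def check_alt (up : Int) (num_list : List Int) (max_period : Int) : Bool :=
  decide (checkAltGo up num_list 0 ≤ max_period)

-- ===== PRECONDITION & SPEC =====
def Spec_check (up : Int) (num_list : List Int) (max_period : Int) (out : Bool) : Prop := out = check_alt up num_list max_period
instance (up : Int) (num_list : List Int) (max_period : Int) (out : Bool) : Decidable (Spec_check up num_list max_period out) := by unfold Spec_check; infer_instance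

-- ===== CLAIM (what is proved, stated in full; the proofs are below) =====
def Claim_equal_check : Prop := ∀ (up : Int) (num_list : List Int) (max_period : Int), Dom_check up num_list max_period → Spec_check up num_list max_period (check up num_list max_period)

-- ===== LEMMAS AND PROOFS =====

-- structural version of A's loop
def aCount (up : Int) : List Int → Int × Int → Int × Int
  | [], s => s
  | [_], s => (s.1, s.2 + 1)
  | x :: y :: r, s =>
      if s.1 + x + y > up then aCount up (y :: r) (0, s.2 + 1)
      else aCount up (y :: r) (s.1 + x, s.2)

lemma drop_eq_cons_getD {full : List Int} {a : Nat} {x : Int} {xs : List Int}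
    (h : full.drop a = x :: xs) : full.getD a 0 = x := by
  have ha : a < full.length := by
    by_contra hc
    simp [List.drop_eq_nil_of_le (Nat.le_of_not_lt hc)] at h
  have : full.drop a = full[a] :: full.drop (a + 1) := List.drop_eq_getElem_cons ha
  rw [this, List.cons.injEq] at h
  simp [List.getD, List.getElem?_eq_getElem ha, h.1]

lemma drop_succ_of_drop_cons {full : List Int} {a : Nat} {x : Int} {xs : List Int}
    (h : full.drop a = x :: xs) : full.drop (a + 1) = xs := by
  have ha : a < full.length := by
    by_contra hc
    simp [List.drop_eq_nil_of_le (Nat.le_of_not_lt hc)] at h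
  have : full.drop a = full[a] :: full.drop (a + 1) := List.drop_eq_getElem_cons ha
  rw [this, List.cons.injEq] at h
  exact h.2

lemma loopA_eq (up : Int) (full : List Int) :
    ∀ (xs : List Int) (a : Nat), full.drop a = xs → ∀ (s : Int × Int),
      (PySem.List.pyRange (a : Int) (full.length : Int) 1).foldl (checkBody up full) s
        = aCount up xs s := by
  intro xs
  induction xs with
  | nil =>
      intro a h s
      have hle : full.length ≤ a := by
        by_contra hc
        have hd := List.drop_eq_getElem_cons (Nat.lt_of_not_le hc)
        rw [h] at hd; exact List.cons_ne_nil _ _ hd.symm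
      rw [PySem.List.pyRange_one_eq_nil (by exact_mod_cast hle)]
      rfl
  | cons x rest ih =>
      intro a h s
      have ha : a < full.length := by
        by_contra hc
        simp [List.drop_eq_nil_of_le (Nat.le_of_not_lt hc)] at h
      have hgx : full.getD a 0 = x := drop_eq_cons_getD h
      have hdrop : full.drop (a + 1) = rest := drop_succ_of_drop_cons h
      rw [PySem.List.pyRange_one_cons (by exact_mod_cast ha)]
      have hlen : full.length = a + 1 + rest.length := by
        have := congrArg List.length h
        simp [List.length_drop] at this
        omega
      cases rest with
      | nil =>
          have hlast : (a : Int) = (full.length : Int) - 1 := by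
            simp at hlen; omega
          simp only [List.foldl_cons, checkBody, if_pos hlast]
          have : (a : Int) + 1 = (full.length : Int) := by omega
          rw [this, PySem.List.pyRange_one_eq_nil (le_refl _)]
          simp only [List.foldl_nil, aCount]
          split <;> rfl
      | cons y r =>
          have hnotlast : (a : Int) ≠ (full.length : Int) - 1 := by
            simp at hlen; omega
          have hgy : full.getD (a + 1) 0 = y := drop_eq_cons_getD hdrop
          simp only [List.foldl_cons, checkBody, if_neg hnotlast]
          have e1 : PySem.List.pyGetD full (a : Int) 0 = x := by
            rw [PySem.List.pyGetD_natCast]; exact hgx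
          have e2 : PySem.List.pyGetD full ((a : Int) + 1) 0 = y := by
            have : ((a : Int) + 1) = ((a + 1 : Nat) : Int) := by push_cast; ring
            rw [this, PySem.List.pyGetD_natCast]; exact hgy
          rw [e1, e2]
          have hcast : (a : Int) + 1 = ((a + 1 : Nat) : Int) := by push_cast; ring
          rw [hcast]
          by_cases hc : s.1 + x + y > up
          · rw [if_pos hc, ih (a + 1) hdrop]
            simp [aCount, if_pos hc]
          · rw [if_neg hc, ih (a + 1) hdrop]
            simp [aCount, if_neg hc]

-- A's (temp,total) scan equals B's stack collapse once temp is merged into the head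
lemma aCount_eq_altGo (up : Int) :
    ∀ (rest : List Int) (x temp total : Int),
      (aCount up (x :: rest) (temp, total)).2 = checkAltGo up ((temp + x) :: rest) total := by
  intro rest
  induction rest with
  | nil => intro x temp total; simp [aCount, checkAltGo]
  | cons y r ih =>
      intro x temp total
      by_cases hc : temp + x + y > up
      · simp only [aCount, if_pos hc, checkAltGo, ih]
        rw [zero_add]
      · simp only [aCount, if_neg hc, checkAltGo]
        exact ih y (temp + x) total

lemma totals_eq (up : Int) (num_list : List Int) :
    ((PySem.List.pyRange 0 (num_list.length : Int) 1).foldl (checkBody up num_list) (0, 0)).2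
      = checkAltGo up num_list 0 := by
  cases num_list with
  | nil => simp [PySem.List.pyRange_one_eq_nil, checkAltGo]
  | cons x xs =>
      have h := loopA_eq up (x :: xs) (x :: xs) 0 rfl (0, 0)
      norm_num at h ⊢
      rw [h, aCount_eq_altGo up xs x 0 0]
      norm_num

-- ===== VERDICT (by name: the statement is the Claim_ definition above) =====
theorem check_spec : Claim_equal_check := by
  intro up num_list max_period _
  unfold Spec_check check check_alt
  simp only []
  rw [totals_eq up num_list]
  split <;> simp_all
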